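-- pv_equiv track=rewrite | github.com/MrBrantCode/unitest_baseline | mut_generate/mist_train_taco/taco_8021/solution.py | restore_code_fragment
-- ===== SOURCE A (Python) =====
-- import string
--
-- def restore_code_fragment(n, swaps, code_fragment):
--     # Initialize the dictionary with default mappings
--     d = {}
--     for x in string.ascii_uppercase:
--         d[x] = x
--
--     # Perform the swaps
--     for a, b in swaps:
--         a, b = a.upper(), b.upper()
--         d[a], d[b] = d[b], d[a]
--
--     # Extend the dictionary to include lowercase mappings
--     for x in string.ascii_lowercase:
--         d[x] = d[x.upper()].lower()
--
--     # Create a reverse mapping dictionary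
--     m = {}
--     for k, v in list(d.items()):
--         m[v] = k
--
--     # Restore the code fragment using the reverse mapping
--     restored_fragment = ''.join([m[c] if c in m else c for c in code_fragment])
--
--     return restored_fragment
-- ===== SOURCE B (Python) =====
-- import string
--
-- def restore_code_fragment(n, swaps, code_fragment):
--     # Build the restore (inverse) map directly: the inverse of a product of
--     # transpositions is the reversed product, so apply the swaps backwards
--     # to an identity uppercase map.
--     letters = string.ascii_uppercase
--     r = dict(zip(letters, letters))
--     for a, b in reversed(swaps):
--         ua, ub = a.upper(), b.upper()
--         r[ua], r[ub] = r[ub], r[ua]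
--     upper_img = ''.join(r[c] for c in letters)
--     trans = str.maketrans(letters + letters.lower(), upper_img + upper_img.lower())
--     return code_fragment.translate(trans)
-- ===== Notes on version B (the rewrite author's own statement) =====
-- stated objective: faster
-- what changed: B builds the restore (inverse) map directly by applying the swaps in reversed order to an identity uppercase map (the inverse of a product of transpositions is the reversed product), eliminating A's separate forward map, lowercase dict extension and explicit inversion pass, and applies the map with str.maketrans/str.translate instead of a join over a per-character dict lookup.
import Mathlib
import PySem

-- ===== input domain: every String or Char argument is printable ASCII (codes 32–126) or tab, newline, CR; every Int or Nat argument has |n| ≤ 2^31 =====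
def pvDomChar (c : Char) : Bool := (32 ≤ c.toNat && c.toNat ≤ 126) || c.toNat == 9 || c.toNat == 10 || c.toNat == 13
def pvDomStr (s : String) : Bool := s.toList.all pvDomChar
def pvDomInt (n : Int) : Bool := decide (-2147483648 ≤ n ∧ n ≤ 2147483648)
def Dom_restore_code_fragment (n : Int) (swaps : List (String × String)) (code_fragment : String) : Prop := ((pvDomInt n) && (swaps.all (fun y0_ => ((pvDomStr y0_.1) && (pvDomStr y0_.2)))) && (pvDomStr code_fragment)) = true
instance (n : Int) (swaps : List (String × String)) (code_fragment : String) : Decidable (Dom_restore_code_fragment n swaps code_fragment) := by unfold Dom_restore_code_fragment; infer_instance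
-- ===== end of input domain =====

-- B builds the inverse (restore) map directly by applying the swaps in reversed order to an
-- identity uppercase map (the inverse of a product of transpositions is the reversed product),
-- skipping A's separate inversion pass, and applies it via a maketrans/translate-style table.

-- string.ascii_uppercase / string.ascii_lowercase
def pvUpChars : List Char :=
  ['A','B','C','D','E','F','G','H','I','J','K','L','M',
   'N','O','P','Q','R','S','T','U','V','W','X','Y','Z']
def pvLowChars : List Char :=
  ['a','b','c','d','e','f','g','h','i','j','k','l','m',
   'n','o','p','q','r','s','t','u','v','w','x','y','z']
-- ===== PORT A =====
-- loop bodies of A, named step by step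
-- d[a], d[b] = d[b], d[a] after uppercasing; a missing key is a Python KeyError, excluded by Pre_
def pvAswapStep (d : PySem.Dict String String) (p : String × String) : PySem.Dict String String :=
  let a := PySem.Str.upper p.1
  let b := PySem.Str.upper p.2
  match d.get? b, d.get? a with
  | some vb, some va => (d.insert a vb).insert b va
  | _, _ => d
-- d[x] = d[x.upper()].lower(); the uppercase key is always present, so getD is exact
def pvAlowStep (d : PySem.Dict String String) (x : Char) : PySem.Dict String String :=
  d.insert (String.ofList [x])
    (PySem.Str.lower (d.getD (PySem.Str.upper (String.ofList [x])) ""))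
-- m[v] = k
def pvAinvStep (m : PySem.Dict String String) (kv : String × String) : PySem.Dict String String :=
  m.insert kv.2 kv.1
-- m[c] if c in m else c
def pvArestore (m : PySem.Dict String String) (c : Char) : String :=
  match m.get? (String.ofList [c]) with
  | some v => v
  | none => String.ofList [c]

def restore_code_fragment (n : Int) (swaps : List (String × String)) (code_fragment : String) : String :=
  let d0 : PySem.Dict String String :=
    pvUpChars.foldl (fun d x => d.insert (String.ofList [x]) (String.ofList [x])) PySem.Dict.empty
  let d1 : PySem.Dict String String := swaps.foldl pvAswapStep d0
  let d2 : PySem.Dict String String := pvLowChars.foldl pvAlowStep d1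
  let m : PySem.Dict String String := d2.items.foldl pvAinvStep PySem.Dict.empty
  PySem.Str.join "" (code_fragment.toList.map (fun c => pvArestore m c))

-- ===== PORT B =====
def restore_code_fragment_alt (n : Int) (swaps : List (String × String)) (code_fragment : String) : String :=
  let r0 : PySem.Dict String String :=
    (pvUpChars.zip pvUpChars).foldl
      (fun d p => d.insert (String.ofList [p.1]) (String.ofList [p.2])) PySem.Dict.empty
  let r : PySem.Dict String String :=
    swaps.reverse.foldl (fun d p =>
      let ua := PySem.Str.upper p.1
      let ub := PySem.Str.upper p.2
      -- r[ua], r[ub] = r[ub], r[ua]; a missing key is a Python KeyError, excluded by Pre_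
      match d.get? ub, d.get? ua with
      | some vb, some va => (d.insert ua vb).insert ub va
      | _, _ => d) r0
  let upperImg : String :=
    PySem.Str.join "" (pvUpChars.map (fun c => r.getD (String.ofList [c]) ""))
  -- str.maketrans(letters + letters.lower(), upper_img + upper_img.lower())
  let xs : List Char := pvUpChars ++ pvLowChars
  let ys : List Char := upperImg.toList ++ (PySem.Str.lower upperImg).toList
  let trans : PySem.Dict Char Char :=
    (xs.zip ys).foldl (fun t p => t.insert p.1 p.2) PySem.Dict.empty
  -- code_fragment.translate(trans)
  String.ofList (code_fragment.toList.map (fun c => trans.getD c c))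

-- ===== PRECONDITION & SPEC =====
-- Pre_ excludes exactly the inputs on which A raises KeyError: a swap component whose upper()
-- is not a single uppercase ASCII letter (B raises the same KeyError there).
def Pre_restore_code_fragment (n : Int) (swaps : List (String × String)) (code_fragment : String) : Prop :=
  ∀ p ∈ swaps, (PySem.Str.upper p.1).toList ∈ pvUpChars.map (fun c => [c])
    ∧ (PySem.Str.upper p.2).toList ∈ pvUpChars.map (fun c => [c])
instance (n : Int) (swaps : List (String × String)) (code_fragment : String) : Decidable (Pre_restore_code_fragment n swaps code_fragment) := by unfold Pre_restore_code_fragment; infer_instance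

def pvWitness_restore_code_fragment : Int × (List (String × String)) × String :=
  (0, [("a", "B"), ("b", "c")], "Abc, xyz!")

def Spec_restore_code_fragment (n : Int) (swaps : List (String × String)) (code_fragment : String) (out : String) : Prop := out = restore_code_fragment_alt n swaps code_fragment
instance (n : Int) (swaps : List (String × String)) (code_fragment : String) (out : String) : Decidable (Spec_restore_code_fragment n swaps code_fragment out) := by unfold Spec_restore_code_fragment; infer_instance

-- ===== CLAIM (what is proved, stated in full; the proofs are below) =====
def Claim_equal_restore_code_fragment : Prop := ∀ (n : Int) (swaps : List (String × String)) (code_fragment : String), Dom_restore_code_fragment n swaps code_fragment → Pre_restore_code_fragment n swaps code_fragment → Spec_restore_code_fragment n swaps code_fragment (restore_code_fragment n swaps code_fragment)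

-- ===== LEMMAS AND PROOFS =====

-- the uppercase / lowercase letters as single-character strings (the keys of A's dicts)
def pvUpStrs : List String := pvUpChars.map (fun c => String.ofList [c])
def pvLowStrs : List String := pvLowChars.map (fun c => String.ofList [c])

-- the transposition of a and b (as it acts on lookups: the *last* assignment d[b] wins)
def pvT (a b x : String) : String := if x = b then a else if x = a then b else x
-- the function-level meaning of the swap loop: X ↦ final value of d[X]
def pvF (s : List (String × String)) : String → String :=
  s.foldl (fun f p => fun x => f (pvT (PySem.Str.upper p.1) (PySem.Str.upper p.2) x)) id

lemma pvT_invol (a b x : String) : pvT a b (pvT a b x) = x := by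
  unfold pvT; split_ifs <;> simp_all

lemma pvF_shift (s : List (String × String)) :
    ∀ (g : String → String) (x : String),
      s.foldl (fun f p => fun x => f (pvT (PySem.Str.upper p.1) (PySem.Str.upper p.2) x)) g x
        = g (pvF s x) := by
  intro g x
  induction s generalizing g x with
  | nil => simp [pvF]
  | cons p t ih =>
    simp only [List.foldl_cons, pvF]
    rw [ih, ih (fun x => id (pvT (PySem.Str.upper p.1) (PySem.Str.upper p.2) x))]
    rfl


lemma pvF_cons (p : String × String) (t : List (String × String)) (x : String) :
    pvF (p :: t) x = pvT (PySem.Str.upper p.1) (PySem.Str.upper p.2) (pvF t x) := by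
  unfold pvF
  rw [List.foldl_cons, pvF_shift]
  rfl


lemma pvF_append_singleton (s : List (String × String)) (p : String × String) (x : String) :
    pvF (s ++ [p]) x = pvF s (pvT (PySem.Str.upper p.1) (PySem.Str.upper p.2) x) := by
  unfold pvF
  rw [List.foldl_append, List.foldl_cons, List.foldl_nil, pvF_shift]


lemma pvF_rev_cancel (s : List (String × String)) (x : String) :
    pvF s.reverse (pvF s x) = x := by
  induction s generalizing x with
  | nil => simp [pvF]
  | cons p t ih =>
    rw [pvF_cons, List.reverse_cons, pvF_append_singleton, pvT_invol, ih]


lemma pvF_cancel_rev (s : List (String × String)) (x : String) :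
    pvF s (pvF s.reverse x) = x := by
  have h := pvF_rev_cancel s.reverse x
  rwa [List.reverse_reverse] at h


lemma pvF_inj (s : List (String × String)) : Function.Injective (pvF s) :=
  Function.LeftInverse.injective (g := pvF s.reverse) (fun x => pvF_rev_cancel s x)

lemma pvT_mem {a b x : String} (ha : a ∈ pvUpStrs) (hb : b ∈ pvUpStrs) (hx : x ∈ pvUpStrs) :
    pvT a b x ∈ pvUpStrs := by
  unfold pvT; split_ifs <;> assumption

lemma pvF_mem {s : List (String × String)}
    (hs : ∀ p ∈ s, PySem.Str.upper p.1 ∈ pvUpStrs ∧ PySem.Str.upper p.2 ∈ pvUpStrs)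
    {x : String} (hx : x ∈ pvUpStrs) : pvF s x ∈ pvUpStrs := by
  induction s generalizing x with
  | nil => simpa [pvF]
  | cons p t ih =>
    rw [pvF_cons]
    exact pvT_mem (hs p (by simp)).1 (hs p (by simp)).2
      (ih (fun q hq => hs q (List.mem_cons_of_mem _ hq)) hx)


-- the swap loop, one step, on a dict whose items are pvUpStrs tagged by w
lemma pvSwapStep_mk (w : String → String) (p : String × String)
    (ha : PySem.Str.upper p.1 ∈ pvUpStrs) (hb : PySem.Str.upper p.2 ∈ pvUpStrs) :
    (fun (d : PySem.Dict String String) (p : String × String) =>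
      let a := PySem.Str.upper p.1
      let b := PySem.Str.upper p.2
      match d.get? b, d.get? a with
      | some vb, some va => (d.insert a vb).insert b va
      | _, _ => d)
      (PySem.Dict.mk (pvUpStrs.map (fun X => (X, w X)))) p
    = PySem.Dict.mk (pvUpStrs.map (fun X =>
        (X, w (pvT (PySem.Str.upper p.1) (PySem.Str.upper p.2) X)))) := by
  have hnd : pvUpStrs.Nodup := by decide
  have hkeys : (PySem.Dict.mk (pvUpStrs.map (fun X => (X, w X)))).keys = pvUpStrs := by
    simp [PySem.Dict.keys_mk, List.map_map, Function.comp_def]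
  have hgB : (PySem.Dict.mk (pvUpStrs.map (fun X => (X, w X)))).get? (PySem.Str.upper p.2)
      = some (w (PySem.Str.upper p.2)) :=
    PySem.Dict.get?_of_mem_items _ (List.mem_map_of_mem hb) (by rw [hkeys]; exact hnd)
  have hgA : (PySem.Dict.mk (pvUpStrs.map (fun X => (X, w X)))).get? (PySem.Str.upper p.1)
      = some (w (PySem.Str.upper p.1)) :=
    PySem.Dict.get?_of_mem_items _ (List.mem_map_of_mem ha) (by rw [hkeys]; exact hnd)
  simp only [hgA, hgB]
  have hcA : (PySem.Dict.mk (pvUpStrs.map (fun X => (X, w X)))).contains (PySem.Str.upper p.1) = true := by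
    rw [PySem.Dict.contains_iff_mem_keys, hkeys]; exact ha
  apply PySem.Dict.ext
  rw [PySem.Dict.items_insert_of_contains _ _ (by
        rw [PySem.Dict.contains_iff_mem_keys, PySem.Dict.keys_insert_of_contains _ _ hcA, hkeys]; exact hb),
      PySem.Dict.items_insert_of_contains _ _ hcA]
  dsimp only
  rw [List.map_map, List.map_map]
  apply List.map_congr_left
  intro X hX
  by_cases hXB : X = PySem.Str.upper p.2 <;> by_cases hXA : X = PySem.Str.upper p.1 <;>
    simp [pvT, hXB, hXA, Function.comp] <;> split_ifs <;> simp_all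

-- the whole swap loop on a dict whose items are pvUpStrs tagged by w
lemma pvSwapFold_mk (s : List (String × String)) :
    ∀ (w : String → String),
    (∀ p ∈ s, PySem.Str.upper p.1 ∈ pvUpStrs ∧ PySem.Str.upper p.2 ∈ pvUpStrs) →
    s.foldl (fun (d : PySem.Dict String String) (p : String × String) =>
      let a := PySem.Str.upper p.1
      let b := PySem.Str.upper p.2
      match d.get? b, d.get? a with
      | some vb, some va => (d.insert a vb).insert b va
      | _, _ => d)
      (PySem.Dict.mk (pvUpStrs.map (fun X => (X, w X))))
    = PySem.Dict.mk (pvUpStrs.map (fun X => (X, w (pvF s X)))) := by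
  induction s with
  | nil => intro w _; simp [pvF]
  | cons p t ih =>
    intro w hs
    rw [List.foldl_cons]
    have hstep := pvSwapStep_mk w p (hs p (by simp)).1 (hs p (by simp)).2
    have hrest := ih (fun X => w (pvT (PySem.Str.upper p.1) (PySem.Str.upper p.2) X))
      (fun q hq => hs q (List.mem_cons_of_mem _ hq))
    have hfix : (PySem.Dict.mk (pvUpStrs.map (fun X =>
        (X, w (pvT (PySem.Str.upper p.1) (PySem.Str.upper p.2) (pvF t X)))))
        : PySem.Dict String String)
        = PySem.Dict.mk (pvUpStrs.map (fun X => (X, w (pvF (p :: t) X)))) := by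
      congr 1
      apply List.map_congr_left
      intro X _
      rw [pvF_cons]
    exact (congrArg (fun d => List.foldl _ d t) hstep).trans (hrest.trans hfix)

-- the lowercase-extension loop appends fresh lowercase keys carrying lowered uppercase images
lemma pvLowFold (w : String → String) :
    ∀ (ls : List Char) (acc : List (String × String)),
    (pvUpStrs ++ acc.map (·.1) ++ ls.map (fun x => String.ofList [x])).Nodup →
    (∀ x ∈ ls, PySem.Str.upper (String.ofList [x]) ∈ pvUpStrs) →
    ls.foldl (fun (d : PySem.Dict String String) (x : Char) =>
        d.insert (String.ofList [x])
          (PySem.Str.lower (d.getD (PySem.Str.upper (String.ofList [x])) "")))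
      (PySem.Dict.mk (pvUpStrs.map (fun X => (X, w X)) ++ acc))
    = PySem.Dict.mk (pvUpStrs.map (fun X => (X, w X)) ++ acc
        ++ ls.map (fun x => (String.ofList [x],
             PySem.Str.lower (w (PySem.Str.upper (String.ofList [x])))))) := by
  intro ls
  induction ls with
  | nil => intro acc _ _; simp
  | cons x t ih =>
    intro acc hnd hup
    have hndk : (pvUpStrs ++ acc.map (·.1)).Nodup :=
      ((List.nodup_append.mp hnd).1 : _)
    have hkeys : (PySem.Dict.mk (pvUpStrs.map (fun X => (X, w X)) ++ acc)).keys
        = pvUpStrs ++ acc.map (·.1) := by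
      simp [PySem.Dict.keys_mk, List.map_map, Function.comp_def]
    have hgetU : (PySem.Dict.mk (pvUpStrs.map (fun X => (X, w X)) ++ acc)).getD
        (PySem.Str.upper (String.ofList [x])) "" = w (PySem.Str.upper (String.ofList [x])) := by
      refine PySem.Dict.getD_of_mem_items _ ?_ (by rw [hkeys]; exact hndk) ""
      exact List.mem_append_left _ (List.mem_map_of_mem (hup x (by simp)))
    have hfresh : (PySem.Dict.mk (pvUpStrs.map (fun X => (X, w X)) ++ acc)).contains
        (String.ofList [x]) = false := by
      rw [← Bool.not_eq_true, PySem.Dict.contains_iff_mem_keys, hkeys]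
      intro hmem
      exact (List.nodup_append.mp hnd).2.2 _ hmem (String.ofList [x]) (by simp) rfl
    rw [List.foldl_cons]
    have hstep : (PySem.Dict.mk (pvUpStrs.map (fun X => (X, w X)) ++ acc)).insert
          (String.ofList [x])
          (PySem.Str.lower ((PySem.Dict.mk (pvUpStrs.map (fun X => (X, w X)) ++ acc)).getD
            (PySem.Str.upper (String.ofList [x])) ""))
        = PySem.Dict.mk (pvUpStrs.map (fun X => (X, w X))
            ++ (acc ++ [(String.ofList [x],
                  PySem.Str.lower (w (PySem.Str.upper (String.ofList [x]))))])) := by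
      rw [hgetU]
      apply PySem.Dict.ext
      rw [PySem.Dict.items_insert_of_not_contains _ _ hfresh]
      simp
    have hrest := ih (acc ++ [(String.ofList [x],
        PySem.Str.lower (w (PySem.Str.upper (String.ofList [x]))))])
      (by simpa [List.append_assoc] using hnd)
      (fun c hc => hup c (List.mem_cons_of_mem _ hc))
    have hfix : (pvUpStrs.map (fun X => (X, w X))
          ++ (acc ++ [(String.ofList [x],
               PySem.Str.lower (w (PySem.Str.upper (String.ofList [x]))))])
          ++ t.map (fun c => (String.ofList [c],
               PySem.Str.lower (w (PySem.Str.upper (String.ofList [c]))))))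
        = pvUpStrs.map (fun X => (X, w X)) ++ acc
          ++ (x :: t).map (fun c => (String.ofList [c],
               PySem.Str.lower (w (PySem.Str.upper (String.ofList [c]))))) := by
      simp [List.append_assoc]
    exact (congrArg (fun d => List.foldl _ d t) hstep).trans
      (hrest.trans (congrArg PySem.Dict.mk hfix))

-- canonical item lists of A's dicts, and the common per-character output function
def pvUpPairs (s : List (String × String)) : List (String × String) :=
  pvUpStrs.map (fun X => (X, pvF s X))
def pvLowPairs (s : List (String × String)) : List (String × String) :=
  pvLowChars.map (fun x => (String.ofList [x],
    PySem.Str.lower (pvF s (PySem.Str.upper (String.ofList [x])))))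
def pvItems (s : List (String × String)) : List (String × String) :=
  pvUpPairs s ++ pvLowPairs s
def pvHead (q : String) : Char := q.toList.headD '?'
def pvPhi (s : List (String × String)) (c : Char) : Char :=
  pvHead (pvF s.reverse (String.ofList [c]))
def pvOut (s : List (String × String)) (c : Char) : Char :=
  if c ∈ pvUpChars then pvPhi s c
  else if c ∈ pvLowChars then
    pvHead (PySem.Str.lower (pvF s.reverse (PySem.Str.upper (String.ofList [c]))))
  else c

-- single-character string lemmas (general c)
lemma pvHead_single (c : Char) : pvHead (String.ofList [c]) = c := by simp [pvHead]
lemma pvUpper_single (c : Char) :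
    PySem.Str.upper (String.ofList [c]) = String.ofList [PySem.Chars.upperChar c] :=
  String.toList_inj.mp (by
    rw [PySem.Str.toList_upper, String.toList_ofList, String.toList_ofList]
    simp [PySem.Chars.upper])
lemma pvLower_single (c : Char) :
    PySem.Str.lower (String.ofList [c]) = String.ofList [PySem.Chars.lowerChar c] :=
  String.toList_inj.mp (by
    rw [PySem.Str.toList_lower, String.toList_ofList, String.toList_ofList]
    simp [PySem.Chars.lower])
lemma pvOfList_inj {x y : Char} (h : String.ofList [x] = String.ofList [y]) : x = y := by
  have := congrArg String.toList h
  simpa using this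

-- closed char-level facts about the two alphabets (stated via List.all so the kernel
-- evaluates them without deep recursion)
lemma pvFactC_nodupU : pvUpChars.Nodup := by decide
set_option maxRecDepth 4096 in
lemma pvFactC_nodupX : (pvUpChars ++ pvLowChars).Nodup := by decide
lemma pvFactC_upmem : ∀ c ∈ pvLowChars, PySem.Chars.upperChar c ∈ pvUpChars := by
  have h : (pvLowChars.all (fun c => decide (PySem.Chars.upperChar c ∈ pvUpChars))) = true := by
    decide
  simpa [List.all_eq_true] using h
lemma pvFactC_lowmem : ∀ c ∈ pvUpChars, PySem.Chars.lowerChar c ∈ pvLowChars := by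
  have h : (pvUpChars.all (fun c => decide (PySem.Chars.lowerChar c ∈ pvLowChars))) = true := by
    decide
  simpa [List.all_eq_true] using h
lemma pvFactC_ul : ∀ c ∈ pvLowChars, PySem.Chars.lowerChar (PySem.Chars.upperChar c) = c := by
  have h : (pvLowChars.all (fun c =>
      decide (PySem.Chars.lowerChar (PySem.Chars.upperChar c) = c))) = true := by decide
  simpa [List.all_eq_true] using h
lemma pvFactC_lu : ∀ c ∈ pvUpChars, PySem.Chars.upperChar (PySem.Chars.lowerChar c) = c := by
  have h : (pvUpChars.all (fun c =>
      decide (PySem.Chars.upperChar (PySem.Chars.lowerChar c) = c))) = true := by decide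
  simpa [List.all_eq_true] using h
lemma pvFactC_lowinj : ∀ p ∈ pvUpChars, ∀ q ∈ pvUpChars,
    PySem.Chars.lowerChar p = PySem.Chars.lowerChar q → p = q := by
  have h : (pvUpChars.all (fun p => pvUpChars.all (fun q =>
      decide (PySem.Chars.lowerChar p = PySem.Chars.lowerChar q → p = q)))) = true := by decide
  have h' : ∀ p ∈ pvUpChars, ∀ q ∈ pvUpChars,
      ¬PySem.Chars.lowerChar p = PySem.Chars.lowerChar q ∨ p = q := by
    simpa [List.all_eq_true] using h
  intro p hp q hq hl
  rcases h' p hp q hq with h1 | h2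
  · exact absurd hl h1
  · exact h2
lemma pvFactC_lowmap : pvLowChars = pvUpChars.map PySem.Chars.lowerChar := by decide

-- derived string-level facts
lemma pvMemU_char {c : Char} (h : String.ofList [c] ∈ pvUpStrs) : c ∈ pvUpChars := by
  obtain ⟨c', hc', he⟩ := List.mem_map.mp h
  exact (pvOfList_inj he) ▸ hc'
lemma pvMemL_char {c : Char} (h : String.ofList [c] ∈ pvLowStrs) : c ∈ pvLowChars := by
  obtain ⟨c', hc', he⟩ := List.mem_map.mp h
  exact (pvOfList_inj he) ▸ hc'
lemma pvPreBridge (q : String) :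
    q.toList ∈ pvUpChars.map (fun c => [c]) ↔ q ∈ pvUpStrs := by
  constructor
  · intro h
    obtain ⟨c, hc, he⟩ := List.mem_map.mp h
    have : q = String.ofList [c] := String.toList_inj.mp (by rw [← he, String.toList_ofList])
    exact this ▸ List.mem_map_of_mem hc
  · intro h
    obtain ⟨c, hc, he⟩ := List.mem_map.mp h
    rw [← he, String.toList_ofList]
    exact List.mem_map_of_mem hc
lemma pvFact_nodupU : pvUpStrs.Nodup := pvFactC_nodupU.map (fun _ _ h => pvOfList_inj h)
lemma pvFact_nodupUL : (pvUpStrs ++ pvLowStrs).Nodup := by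
  have h : pvUpStrs ++ pvLowStrs = (pvUpChars ++ pvLowChars).map (fun c => String.ofList [c]) := by
    simp [pvUpStrs, pvLowStrs]
  rw [h]
  exact pvFactC_nodupX.map (fun _ _ hh => pvOfList_inj hh)
lemma pvFact_lower_inj : ∀ P ∈ pvUpStrs, ∀ Q ∈ pvUpStrs,
    PySem.Str.lower P = PySem.Str.lower Q → P = Q := by
  intro P hP Q hQ h
  obtain ⟨p, hp, hep⟩ := List.mem_map.mp hP
  obtain ⟨q, hq, heq⟩ := List.mem_map.mp hQ
  subst hep heq
  rw [pvLower_single, pvLower_single] at h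
  rw [pvFactC_lowinj p hp q hq (pvOfList_inj h)]
lemma pvFact_lower_mem : ∀ P ∈ pvUpStrs, PySem.Str.lower P ∈ pvLowStrs := by
  intro P hP
  obtain ⟨p, hp, hep⟩ := List.mem_map.mp hP
  subst hep
  rw [pvLower_single]
  exact List.mem_map_of_mem (pvFactC_lowmem p hp)
lemma pvFact_upper_low : ∀ c ∈ pvLowChars,
    PySem.Str.upper (String.ofList [c]) ∈ pvUpStrs := by
  intro c hc
  rw [pvUpper_single]
  exact List.mem_map_of_mem (pvFactC_upmem c hc)
lemma pvFact_upper_lower : ∀ X ∈ pvUpStrs, PySem.Str.upper (PySem.Str.lower X) = X := by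
  intro X hX
  obtain ⟨x, hx, hex⟩ := List.mem_map.mp hX
  subst hex
  rw [pvLower_single, pvUpper_single, pvFactC_lu x hx]
lemma pvFact_lower_upper : ∀ c ∈ pvLowChars,
    PySem.Str.lower (PySem.Str.upper (String.ofList [c])) = String.ofList [c] := by
  intro c hc
  rw [pvUpper_single, pvLower_single, pvFactC_ul c hc]
lemma pvFact_toListU : ∀ q ∈ pvUpStrs, q.toList = [pvHead q] := by
  intro q hq
  obtain ⟨c, _, he⟩ := List.mem_map.mp hq
  subst he
  rw [pvHead_single, String.toList_ofList]
lemma pvFact_head_lower (c : Char) :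
    pvHead (PySem.Str.lower (String.ofList [c]))
      = PySem.Chars.lowerChar (pvHead (String.ofList [c])) := by
  rw [pvLower_single, pvHead_single, pvHead_single]

-- A's first dict: identity on the uppercase letters
lemma pv_d0 :
    (pvUpChars.foldl (fun d x => d.insert (String.ofList [x]) (String.ofList [x]))
      PySem.Dict.empty : PySem.Dict String String)
    = PySem.Dict.mk (pvUpStrs.map (fun X => (X, id X))) := by decide

lemma pv_d1 (s : List (String × String))
    (hs : ∀ p ∈ s, PySem.Str.upper p.1 ∈ pvUpStrs ∧ PySem.Str.upper p.2 ∈ pvUpStrs) :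
    s.foldl pvAswapStep
      (pvUpChars.foldl (fun d x => d.insert (String.ofList [x]) (String.ofList [x]))
        PySem.Dict.empty)
    = PySem.Dict.mk (pvUpPairs s) :=
  (congrArg (fun d => List.foldl pvAswapStep d s) pv_d0).trans (pvSwapFold_mk s id hs)

lemma pv_d2 (s : List (String × String))
    (hs : ∀ p ∈ s, PySem.Str.upper p.1 ∈ pvUpStrs ∧ PySem.Str.upper p.2 ∈ pvUpStrs) :
    pvLowChars.foldl pvAlowStep (PySem.Dict.mk (pvUpPairs s))
    = PySem.Dict.mk (pvItems s) := by
  have h := pvLowFold (pvF s) pvLowChars []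
    (by simpa [pvLowStrs] using pvFact_nodupUL)
    pvFact_upper_low
  have e1 : (PySem.Dict.mk (pvUpStrs.map (fun X => (X, pvF s X)) ++ [])
      : PySem.Dict String String) = PySem.Dict.mk (pvUpPairs s) := by
    simp [pvUpPairs]
  have e2 : (PySem.Dict.mk (pvUpStrs.map (fun X => (X, pvF s X)) ++ []
      ++ pvLowChars.map (fun x => (String.ofList [x],
           PySem.Str.lower (pvF s (PySem.Str.upper (String.ofList [x]))))))
      : PySem.Dict String String) = PySem.Dict.mk (pvItems s) := by
    simp [pvItems, pvUpPairs, pvLowPairs]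
  rw [← e1]
  exact h.trans e2

-- the values of A's extended dict, and their distinctness
lemma pv_values_eq (s : List (String × String)) :
    (pvItems s).map (fun kv => kv.2)
      = pvUpStrs.map (pvF s)
        ++ pvLowChars.map (fun x =>
             PySem.Str.lower (pvF s (PySem.Str.upper (String.ofList [x])))) := by
  simp [pvItems, pvUpPairs, pvLowPairs, List.map_map, Function.comp_def]

lemma pv_upper_single_inj : ∀ x ∈ pvLowChars, ∀ y ∈ pvLowChars,
    PySem.Str.upper (String.ofList [x]) = PySem.Str.upper (String.ofList [y]) → x = y := by
  intro x hx y hy h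
  rw [pvUpper_single, pvUpper_single] at h
  have h' := pvOfList_inj h
  calc x = PySem.Chars.lowerChar (PySem.Chars.upperChar x) := (pvFactC_ul x hx).symm
    _ = PySem.Chars.lowerChar (PySem.Chars.upperChar y) := by rw [h']
    _ = y := pvFactC_ul y hy

lemma pv_values_nodup (s : List (String × String))
    (hs : ∀ p ∈ s, PySem.Str.upper p.1 ∈ pvUpStrs ∧ PySem.Str.upper p.2 ∈ pvUpStrs) :
    ((pvItems s).map (fun kv => kv.2)).Nodup := by
  rw [pv_values_eq, List.nodup_append]
  refine ⟨pvFact_nodupU.map (pvF_inj s), ?_, ?_⟩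
  · apply List.Nodup.map_on
    · intro x hx y hy he
      have h1 := pvFact_lower_inj _ (pvF_mem hs (pvFact_upper_low x hx))
        _ (pvF_mem hs (pvFact_upper_low y hy)) he
      exact pv_upper_single_inj x hx y hy (pvF_inj s h1)
    · exact (List.nodup_append.mp pvFactC_nodupX).2.1
  · intro a ha b hb
    obtain ⟨X, hX, heX⟩ := List.mem_map.mp ha
    obtain ⟨y, hy, hey⟩ := List.mem_map.mp hb
    have haU : a ∈ pvUpStrs := heX ▸ pvF_mem hs hX
    have hbL : b ∈ pvLowStrs :=
      hey ▸ pvFact_lower_mem _ (pvF_mem hs (pvFact_upper_low y hy))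
    exact (List.nodup_append.mp pvFact_nodupUL).2.2 a haU b hbL

-- the reverse-mapping dict m
lemma pv_m (s : List (String × String))
    (hs : ∀ p ∈ s, PySem.Str.upper p.1 ∈ pvUpStrs ∧ PySem.Str.upper p.2 ∈ pvUpStrs) :
    ((pvItems s).foldl pvAinvStep (PySem.Dict.empty : PySem.Dict String String)).items
    = (pvItems s).map (fun kv => (kv.2, kv.1)) := by
  have h := PySem.Dict.items_foldl_insert_fresh (pvItems s) (fun kv => kv.2) (fun kv => kv.1)
    PySem.Dict.empty (fun a _ => PySem.Dict.contains_empty a.2) (pv_values_nodup s hs)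
  simpa using h

lemma pv_m_keys_nodup (s : List (String × String))
    (hs : ∀ p ∈ s, PySem.Str.upper p.1 ∈ pvUpStrs ∧ PySem.Str.upper p.2 ∈ pvUpStrs)
    (M : PySem.Dict String String)
    (hM : M.items = (pvItems s).map (fun kv => (kv.2, kv.1))) : M.keys.Nodup := by
  have hkeys : M.keys = ((pvItems s).map (fun kv => (kv.2, kv.1))).map (fun q => q.1) := by
    simp only [PySem.Dict.keys, hM]
  rw [hkeys, List.map_map]
  simpa [Function.comp_def] using pv_values_nodup s hs

-- what A's reverse mapping produces on a single character
lemma pvA_char (s : List (String × String))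
    (hs : ∀ p ∈ s, PySem.Str.upper p.1 ∈ pvUpStrs ∧ PySem.Str.upper p.2 ∈ pvUpStrs)
    (M : PySem.Dict String String)
    (hM : M.items = (pvItems s).map (fun kv => (kv.2, kv.1))) (c : Char) :
    (pvArestore M c).toList = [pvOut s c] := by
  have hs' : ∀ p ∈ s.reverse, PySem.Str.upper p.1 ∈ pvUpStrs ∧ PySem.Str.upper p.2 ∈ pvUpStrs :=
    fun p hp => hs p (List.mem_reverse.mp hp)
  have hknd := pv_m_keys_nodup s hs M hM
  by_cases hcU : c ∈ pvUpChars
  · have hXmem : pvF s.reverse (String.ofList [c]) ∈ pvUpStrs :=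
      pvF_mem hs' (List.mem_map_of_mem hcU)
    have hpair : (String.ofList [c], pvF s.reverse (String.ofList [c])) ∈ M.items := by
      rw [hM]
      refine List.mem_map.mpr ⟨(pvF s.reverse (String.ofList [c]),
        pvF s (pvF s.reverse (String.ofList [c]))), ?_, ?_⟩
      · exact List.mem_append_left _ (List.mem_map.mpr ⟨_, hXmem, rfl⟩)
      · rw [pvF_cancel_rev]
    unfold pvArestore
    rw [PySem.Dict.get?_of_mem_items M hpair hknd]
    show (pvF s.reverse (String.ofList [c])).toList = [pvOut s c]
    rw [pvFact_toListU _ hXmem]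
    simp [pvOut, pvPhi, hcU]
  · by_cases hcL : c ∈ pvLowChars
    · have hU : PySem.Str.upper (String.ofList [c]) ∈ pvUpStrs := pvFact_upper_low c hcL
      have hX : pvF s.reverse (PySem.Str.upper (String.ofList [c])) ∈ pvUpStrs := pvF_mem hs' hU
      have hlowmem : PySem.Str.lower (pvF s.reverse (PySem.Str.upper (String.ofList [c])))
          ∈ pvLowStrs := pvFact_lower_mem _ hX
      obtain ⟨x, hx, hex⟩ := List.mem_map.mp hlowmem
      have hupx : PySem.Str.upper (String.ofList [x])
          = pvF s.reverse (PySem.Str.upper (String.ofList [c])) := by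
        rw [hex]
        exact pvFact_upper_lower _ hX
      have hkv2 : PySem.Str.lower (pvF s (PySem.Str.upper (String.ofList [x])))
          = String.ofList [c] := by
        rw [hupx, pvF_cancel_rev]
        exact pvFact_lower_upper c hcL
      have hpair : (String.ofList [c], String.ofList [x]) ∈ M.items := by
        rw [hM]
        refine List.mem_map.mpr ⟨(String.ofList [x],
          PySem.Str.lower (pvF s (PySem.Str.upper (String.ofList [x])))),
          List.mem_append_right _ (List.mem_map.mpr ⟨x, hx, rfl⟩), ?_⟩
        rw [hkv2]
      unfold pvArestore
      rw [PySem.Dict.get?_of_mem_items M hpair hknd]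
      show (String.ofList [x]).toList = [pvOut s c]
      rw [String.toList_ofList]
      simp only [pvOut, if_neg hcU, if_pos hcL]
      rw [← hex, pvHead_single]
    · have hnone : M.get? (String.ofList [c]) = none := by
        rw [PySem.Dict.get?_eq_none_iff_not_mem_keys]
        intro hmem
        have hkeys : M.keys = ((pvItems s).map (fun kv => (kv.2, kv.1))).map (fun q => q.1) := by
          simp only [PySem.Dict.keys, hM]
        rw [hkeys, List.map_map] at hmem
        have hval : String.ofList [c] ∈ (pvItems s).map (fun kv => kv.2) := by
          simpa [Function.comp_def] using hmem
        rw [pv_values_eq] at hval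
        rcases List.mem_append.mp hval with h1 | h2
        · obtain ⟨X, hX, heX⟩ := List.mem_map.mp h1
          exact hcU (pvMemU_char (heX ▸ pvF_mem hs hX))
        · obtain ⟨y, hy, hey⟩ := List.mem_map.mp h2
          exact hcL (pvMemL_char
            (hey ▸ pvFact_lower_mem _ (pvF_mem hs (pvFact_upper_low y hy))))
      unfold pvArestore
      rw [hnone]
      show (String.ofList [c]).toList = [pvOut s c]
      rw [String.toList_ofList]
      simp [pvOut, hcU, hcL]

-- B's dicts
def pvTransPairs (s : List (String × String)) : List (Char × Char) :=
  pvUpChars.map (fun ch => (ch, pvPhi s ch))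
    ++ pvUpChars.map (fun ch => (PySem.Chars.lowerChar ch, PySem.Chars.lowerChar (pvPhi s ch)))

lemma pv_r0 :
    ((pvUpChars.zip pvUpChars).foldl
      (fun d p => d.insert (String.ofList [p.1]) (String.ofList [p.2]))
      PySem.Dict.empty : PySem.Dict String String)
    = PySem.Dict.mk (pvUpStrs.map (fun X => (X, id X))) := by decide

lemma pv_r (s : List (String × String))
    (hs : ∀ p ∈ s, PySem.Str.upper p.1 ∈ pvUpStrs ∧ PySem.Str.upper p.2 ∈ pvUpStrs) :
    s.reverse.foldl (fun (d : PySem.Dict String String) (p : String × String) =>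
        let ua := PySem.Str.upper p.1
        let ub := PySem.Str.upper p.2
        match d.get? ub, d.get? ua with
        | some vb, some va => (d.insert ua vb).insert ub va
        | _, _ => d)
      ((pvUpChars.zip pvUpChars).foldl
        (fun d p => d.insert (String.ofList [p.1]) (String.ofList [p.2])) PySem.Dict.empty)
    = PySem.Dict.mk (pvUpStrs.map (fun X => (X, pvF s.reverse X))) :=
  (congrArg (fun d => List.foldl _ d s.reverse) pv_r0).trans
    (pvSwapFold_mk s.reverse id (fun p hp => hs p (List.mem_reverse.mp hp)))

lemma pv_upperImg (s : List (String × String))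
    (hs : ∀ p ∈ s, PySem.Str.upper p.1 ∈ pvUpStrs ∧ PySem.Str.upper p.2 ∈ pvUpStrs) :
    PySem.Str.join "" (pvUpChars.map (fun c =>
      (PySem.Dict.mk (pvUpStrs.map (fun X => (X, pvF s.reverse X)))).getD (String.ofList [c]) ""))
    = String.ofList (pvUpChars.map (pvPhi s)) := by
  have hs' : ∀ p ∈ s.reverse, PySem.Str.upper p.1 ∈ pvUpStrs ∧ PySem.Str.upper p.2 ∈ pvUpStrs :=
    fun p hp => hs p (List.mem_reverse.mp hp)
  have hknd : (PySem.Dict.mk (pvUpStrs.map (fun X =>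
      (X, pvF s.reverse X))) : PySem.Dict String String).keys.Nodup := by
    have : (PySem.Dict.mk (pvUpStrs.map (fun X =>
        (X, pvF s.reverse X))) : PySem.Dict String String).keys = pvUpStrs := by
      simp [PySem.Dict.keys_mk, List.map_map, Function.comp_def]
    rw [this]; exact pvFact_nodupU
  apply String.toList_inj.mp
  rw [PySem.Str.toList_join, String.toList_ofList]
  have hpart : (pvUpChars.map (fun c => (PySem.Dict.mk (pvUpStrs.map (fun X =>
        (X, pvF s.reverse X)))).getD (String.ofList [c]) "")).map String.toList
      = (pvUpChars.map (pvPhi s)).map (fun c => [c]) := by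
    rw [List.map_map, List.map_map]
    apply List.map_congr_left
    intro c hc
    have hmemi : (String.ofList [c], pvF s.reverse (String.ofList [c]))
        ∈ (PySem.Dict.mk (pvUpStrs.map (fun X =>
            (X, pvF s.reverse X))) : PySem.Dict String String).items :=
      List.mem_map.mpr ⟨String.ofList [c], List.mem_map_of_mem hc, rfl⟩
    have hget := PySem.Dict.getD_of_mem_items _ hmemi hknd ""
    show ((PySem.Dict.mk (pvUpStrs.map (fun X =>
        (X, pvF s.reverse X))) : PySem.Dict String String).getD
          (String.ofList [c]) "").toList = [pvPhi s c]
    rw [hget, pvFact_toListU _ (pvF_mem hs' (List.mem_map_of_mem hc))]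
    rfl
  rw [hpart]
  rw [PySem.Chars.join_nil_singletons, String.toList_ofList]

lemma pv_zip_self_map {α β : Type} (l : List α) (f : α → β) :
    l.zip (l.map f) = l.map (fun a => (a, f a)) := by
  induction l with
  | nil => rfl
  | cons a t ih => simp [ih]

lemma pv_zip (s : List (String × String)) :
    (pvUpChars ++ pvLowChars).zip
      (pvUpChars.map (pvPhi s) ++ PySem.Chars.lower (pvUpChars.map (pvPhi s)))
    = pvTransPairs s := by
  rw [List.zip_append (by simp)]
  unfold pvTransPairs
  have h2 : pvLowChars.zip (PySem.Chars.lower (pvUpChars.map (pvPhi s)))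
      = pvUpChars.map (fun ch =>
          (PySem.Chars.lowerChar ch, PySem.Chars.lowerChar (pvPhi s ch))) := by
    show pvLowChars.zip ((pvUpChars.map (pvPhi s)).map PySem.Chars.lowerChar) = _
    rw [List.map_map, pvFactC_lowmap, List.zip_map']
    rfl
  rw [pv_zip_self_map, h2]

lemma pv_T_keys (s : List (String × String)) :
    (pvTransPairs s).map (fun p => p.1) = pvUpChars ++ pvLowChars := by
  unfold pvTransPairs
  rw [List.map_append, List.map_map, List.map_map]
  simp [Function.comp_def, pvFactC_lowmap]

lemma pv_T_items (s : List (String × String)) :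
    ((pvTransPairs s).foldl (fun t p => t.insert p.1 p.2)
      (PySem.Dict.empty : PySem.Dict Char Char)).items = pvTransPairs s := by
  have h := PySem.Dict.items_foldl_insert_fresh (pvTransPairs s) (fun p => p.1) (fun p => p.2)
    PySem.Dict.empty (fun a _ => PySem.Dict.contains_empty a.1)
    (by rw [pv_T_keys]; exact pvFactC_nodupX)
  simpa using h

lemma pv_T_getD (s : List (String × String))
    (hs : ∀ p ∈ s, PySem.Str.upper p.1 ∈ pvUpStrs ∧ PySem.Str.upper p.2 ∈ pvUpStrs)
    (T : PySem.Dict Char Char) (hT : T.items = pvTransPairs s) (c : Char) :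
    T.getD c c = pvOut s c := by
  have hs' : ∀ p ∈ s.reverse, PySem.Str.upper p.1 ∈ pvUpStrs ∧ PySem.Str.upper p.2 ∈ pvUpStrs :=
    fun p hp => hs p (List.mem_reverse.mp hp)
  have hknd : T.keys.Nodup := by
    have : T.keys = pvUpChars ++ pvLowChars := by
      simp only [PySem.Dict.keys, hT]
      exact pv_T_keys s
    rw [this]; exact pvFactC_nodupX
  by_cases hcU : c ∈ pvUpChars
  · have hpair : (c, pvPhi s c) ∈ T.items := by
      rw [hT]
      exact List.mem_append_left _ (List.mem_map.mpr ⟨c, hcU, rfl⟩)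
    rw [PySem.Dict.getD_of_mem_items T hpair hknd]
    simp [pvOut, hcU]
  · by_cases hcL : c ∈ pvLowChars
    · obtain ⟨ch, hch, he⟩ := List.mem_map.mp (pvFactC_lowmap ▸ hcL)
      have hpair : (c, PySem.Chars.lowerChar (pvPhi s ch)) ∈ T.items := by
        rw [hT]
        exact List.mem_append_right _ (List.mem_map.mpr ⟨ch, hch, by rw [he]⟩)
      rw [PySem.Dict.getD_of_mem_items T hpair hknd]
      simp only [pvOut, if_neg hcU, if_pos hcL]
      -- lowerChar (pvPhi s ch) = pvHead (lower (pvF s.rev (upper (ofList [c]))))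
      have hupc : PySem.Str.upper (String.ofList [c]) = String.ofList [ch] := by
        rw [← he, pvUpper_single, pvFactC_lu ch hch]
      rw [hupc]
      have hX : pvF s.reverse (String.ofList [ch]) ∈ pvUpStrs :=
        pvF_mem hs' (List.mem_map_of_mem hch)
      obtain ⟨u, _, heu⟩ := List.mem_map.mp hX
      have hphi : pvPhi s ch = u := by
        unfold pvPhi
        rw [← heu, pvHead_single]
      rw [hphi, ← heu, pvFact_head_lower u, pvHead_single]
    · have hno : T.contains c = false := by
        rw [← Bool.not_eq_true, PySem.Dict.contains_iff_mem_keys]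
        have : T.keys = pvUpChars ++ pvLowChars := by
          simp only [PySem.Dict.keys, hT]
          exact pv_T_keys s
        rw [this]
        intro hmem
        rcases List.mem_append.mp hmem with h | h
        · exact hcU h
        · exact hcL h
      rw [PySem.Dict.getD_of_not_contains T c hno]
      simp [pvOut, hcU, hcL]

-- A's whole output
lemma pvA_eq (n : Int) (s : List (String × String)) (code : String)
    (hs : ∀ p ∈ s, PySem.Str.upper p.1 ∈ pvUpStrs ∧ PySem.Str.upper p.2 ∈ pvUpStrs) :
    restore_code_fragment n s code = String.ofList (code.toList.map (pvOut s)) := by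
  have h1 : restore_code_fragment n s code
      = PySem.Str.join "" (code.toList.map (fun c => pvArestore
          ((pvLowChars.foldl pvAlowStep
            (s.foldl pvAswapStep
              (pvUpChars.foldl (fun d x =>
                  d.insert (String.ofList [x]) (String.ofList [x]))
                PySem.Dict.empty))).items.foldl pvAinvStep PySem.Dict.empty) c)) := rfl
  rw [h1, pv_d1 s hs, pv_d2 s hs]
  rw [show (PySem.Dict.mk (pvItems s) : PySem.Dict String String).items = pvItems s from rfl]
  generalize hMd : ((pvItems s).foldl pvAinvStep
    (PySem.Dict.empty : PySem.Dict String String)) = M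
  have hM : M.items = (pvItems s).map (fun kv => (kv.2, kv.1)) := hMd ▸ pv_m s hs
  apply String.toList_inj.mp
  rw [PySem.Str.toList_join, String.toList_ofList, List.map_map]
  have h2 : (code.toList.map (String.toList ∘ fun c => pvArestore M c))
      = (code.toList.map (pvOut s)).map (fun c => [c]) := by
    rw [List.map_map]
    exact List.map_congr_left (fun c _ => pvA_char s hs M hM c)
  rw [h2, PySem.Chars.join_nil_singletons, String.toList_ofList]

-- B's whole output
lemma pvB_eq (n : Int) (s : List (String × String)) (code : String)
    (hs : ∀ p ∈ s, PySem.Str.upper p.1 ∈ pvUpStrs ∧ PySem.Str.upper p.2 ∈ pvUpStrs) :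
    restore_code_fragment_alt n s code = String.ofList (code.toList.map (pvOut s)) := by
  have h1 : restore_code_fragment_alt n s code
      = String.ofList (code.toList.map (fun c =>
          (((pvUpChars ++ pvLowChars).zip
            ((PySem.Str.join "" (pvUpChars.map (fun c2 =>
                (s.reverse.foldl (fun (d : PySem.Dict String String) (p : String × String) =>
                    let ua := PySem.Str.upper p.1
                    let ub := PySem.Str.upper p.2
                    match d.get? ub, d.get? ua with
                    | some vb, some va => (d.insert ua vb).insert ub va
                    | _, _ => d)
                  ((pvUpChars.zip pvUpChars).foldl
                    (fun d p => d.insert (String.ofList [p.1]) (String.ofList [p.2]))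
                    PySem.Dict.empty)).getD (String.ofList [c2]) ""))).toList
              ++ (PySem.Str.lower (PySem.Str.join "" (pvUpChars.map (fun c2 =>
                (s.reverse.foldl (fun (d : PySem.Dict String String) (p : String × String) =>
                    let ua := PySem.Str.upper p.1
                    let ub := PySem.Str.upper p.2
                    match d.get? ub, d.get? ua with
                    | some vb, some va => (d.insert ua vb).insert ub va
                    | _, _ => d)
                  ((pvUpChars.zip pvUpChars).foldl
                    (fun d p => d.insert (String.ofList [p.1]) (String.ofList [p.2]))
                    PySem.Dict.empty)).getD (String.ofList [c2]) "")))).toList)).foldl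
            (fun t p => t.insert p.1 p.2) PySem.Dict.empty).getD c c)) := rfl
  rw [h1, pv_r s hs, pv_upperImg s hs, PySem.Str.toList_lower, String.toList_ofList,
     pv_zip s]
  generalize hTd : ((pvTransPairs s).foldl (fun t p => t.insert p.1 p.2)
    (PySem.Dict.empty : PySem.Dict Char Char)) = T
  have hT : T.items = pvTransPairs s := hTd ▸ pv_T_items s
  exact congrArg String.ofList (List.map_congr_left (fun c _ => pv_T_getD s hs T hT c))

-- ===== VERDICT (by name: the statement is the Claim_ definition above) =====
theorem restore_code_fragment_spec : Claim_equal_restore_code_fragment := by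
  intro n swaps code_fragment _ hpre
  have hs : ∀ p ∈ swaps, PySem.Str.upper p.1 ∈ pvUpStrs ∧ PySem.Str.upper p.2 ∈ pvUpStrs :=
    fun p hp => ⟨(pvPreBridge _).mp (hpre p hp).1, (pvPreBridge _).mp (hpre p hp).2⟩
  unfold Spec_restore_code_fragment
  rw [pvA_eq n swaps code_fragment hs, pvB_eq n swaps code_fragment hs]
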